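-- pv_equiv track=rewrite | github.com/James-HoneyBadger/Time_Warp_Studio | Time_Warp_Python/time_warp/compiler/compiler.py | _translate_expression
-- ===== SOURCE A (Python) =====
-- def _translate_expression(expr: str) -> str:
--     """Translate TempleCode expression to C expression.
--
--     Args:
--         expr: TempleCode expression
--
--     Returns:
--         C expression
--
--     Note:
--         Simplified translation. Full version would use proper parser.
--     """
--     # Replace variable names with array access
--     result = expr
--     for letter in 'ABCDEFGHIJKLMNOPQRSTUVWXYZ':
--         if letter in result:
--             idx = ord(letter) - ord('A')
--             result = result.replace(letter, f'vars[{idx}]')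
--
--     # Replace ^ with pow()
--     if '^' in result:
--         # Simple case: A^B becomes pow(A, B)
--         parts = result.split('^')
--         if len(parts) == 2:
--             result = f'pow({parts[0].strip()}, {parts[1].strip()})'
--
--     return result
-- ===== SOURCE B (Python) =====
-- def _translate_expression(expr: str) -> str:
--     """Translate TempleCode expression to C expression (single-pass rewrite)."""
--     # One pass over the characters instead of 26 full-string replace scans.
--     result = ''.join(f'vars[{ord(c) - 65}]' if 'A' <= c <= 'Z' else c for c in expr)
--
--     # Replace ^ with pow()
--     if '^' in result:
--         parts = result.split('^')
--         if len(parts) == 2: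
--             result = f'pow({parts[0].strip()}, {parts[1].strip()})'
--     return result
-- ===== Notes on version B (the rewrite author's own statement) =====
-- stated objective: simpler
-- what changed: Replaces the 26-iteration alphabet loop of full-string .replace passes with a single pass over the characters of expr (a join over a per-character substitution); the final exponent-to-pow() stage is unchanged.
import Mathlib
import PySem

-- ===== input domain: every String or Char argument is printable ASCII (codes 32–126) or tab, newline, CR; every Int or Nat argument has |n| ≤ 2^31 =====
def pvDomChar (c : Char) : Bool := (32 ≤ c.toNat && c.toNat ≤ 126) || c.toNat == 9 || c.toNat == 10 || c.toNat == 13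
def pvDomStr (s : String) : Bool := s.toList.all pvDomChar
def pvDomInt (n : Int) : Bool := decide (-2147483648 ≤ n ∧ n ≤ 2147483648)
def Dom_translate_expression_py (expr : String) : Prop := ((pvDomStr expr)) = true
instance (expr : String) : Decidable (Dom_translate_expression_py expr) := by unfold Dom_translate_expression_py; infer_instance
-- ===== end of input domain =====

-- B replaces A's 26-iteration alphabet loop of full-string .replace passes by a single
-- pass over the characters (join of a per-character substitution); the '^' → pow() stage
-- is unchanged.  Objective: simpler.

-- ===== PORT A =====
-- f'vars[{idx}]' with idx = ord(letter) - ord('A')  (shared formatting helper, used verbatim by both Pythons)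
def pvVarsOf (letter : Char) : List Char :=
  'v' :: 'a' :: 'r' :: 's' :: '[' :: (PySem.Int.toChars ((letter.toNat : Int) - ('A'.toNat : Int)) ++ [']'])

def pvAlphabet : List Char :=
  ['A','B','C','D','E','F','G','H','I','J','K','L','M','N','O','P','Q','R','S','T','U','V','W','X','Y','Z']

def translate_expression_py (expr : String) : String :=
  -- result = expr; for letter in 'A..Z': if letter in result: result = result.replace(letter, f'vars[{idx}]')
  let result := pvAlphabet.foldl
    (fun result letter =>
      if PySem.Chars.isIn [letter] result then
        PySem.Chars.replace result [letter] (pvVarsOf letter)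
      else result) expr.toList
  -- if '^' in result: parts = result.split('^'); if len(parts) == 2: result = f'pow({parts[0].strip()}, {parts[1].strip()})'
  let result :=
    if PySem.Chars.isIn ['^'] result then
      let parts := PySem.Chars.splitOn result ['^']
      if parts.length = 2 then
        "pow(".toList ++ PySem.Chars.strip (parts.getD 0 []) ++ ", ".toList
          ++ PySem.Chars.strip (parts.getD 1 []) ++ ")".toList
      else result
    else result
  String.ofList result

-- ===== PORT B =====
-- f'vars[{ord(c) - 65}]' if 'A' <= c <= 'Z' else c
def pvSubstChar (c : Char) : List Char :=
  if 'A' ≤ c ∧ c ≤ 'Z' then pvVarsOf c else [c]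

def translate_expression_py_alt (expr : String) : String :=
  -- result = ''.join(f'vars[{ord(c)-65}]' if 'A' <= c <= 'Z' else c for c in expr)
  let result := expr.toList.flatMap pvSubstChar
  -- if '^' in result: parts = result.split('^'); if len(parts) == 2: result = f'pow({parts[0].strip()}, {parts[1].strip()})'
  let result :=
    if PySem.Chars.isIn ['^'] result then
      let parts := PySem.Chars.splitOn result ['^']
      if parts.length = 2 then
        "pow(".toList ++ PySem.Chars.strip (parts.getD 0 []) ++ ", ".toList
          ++ PySem.Chars.strip (parts.getD 1 []) ++ ")".toList
      else result
    else result
  String.ofList result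

-- ===== PRECONDITION & SPEC =====
def Spec_translate_expression_py (expr : String) (out : String) : Prop := out = translate_expression_py_alt expr
instance (expr : String) (out : String) : Decidable (Spec_translate_expression_py expr out) := by unfold Spec_translate_expression_py; infer_instance

-- ===== CLAIM (what is proved, stated in full; the proofs are below) =====
def Claim_equal_translate_expression_py : Prop := ∀ (expr : String), Dom_translate_expression_py expr → Spec_translate_expression_py expr (translate_expression_py expr)

-- ===== LEMMAS AND PROOFS =====

theorem pv_singleton_infix_iff (a : Char) (l : List Char) : [a] <:+: l ↔ a ∈ l := by
  constructor
  · intro h; exact h.subset (by simp)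
  · intro h
    obtain ⟨s, t, rfl⟩ := List.append_of_mem h
    exact ⟨s, t, by simp⟩

-- replace with a single-character needle is the obvious character-wise flatMap
theorem pv_replace_go_single (l : Char) (new : List Char) :
    ∀ (fuel : Nat) (s acc : List Char), s.length ≤ fuel →
      PySem.Chars.replace.go [l] new fuel s acc
        = acc.reverse ++ s.flatMap (fun c => if c = l then new else [c]) := by
  intro fuel
  induction fuel with
  | zero => intro s acc h
            have : s = [] := List.eq_nil_of_length_eq_zero (Nat.le_zero.mp h)
            subst this; rw [PySem.Chars.replace.go]; simp
  | succ n ih =>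
      intro s acc h
      cases s with
      | nil => rw [PySem.Chars.replace.go] <;> simp
      | cons c t =>
          rw [PySem.Chars.replace.go]
          by_cases hc : c = l
          · subst hc
            rw [if_pos (by simp [List.isPrefixOf])]
            rw [ih _ _ (by simpa using Nat.le_of_succ_le_succ h)]
            simp
          · rw [if_neg (by simp [List.isPrefixOf]; exact fun h' => hc h'.symm)]
            rw [ih _ _ (Nat.le_of_succ_le_succ h)]
            simp [hc]

theorem pv_replace_single (s : List Char) (l : Char) (new : List Char) :
    PySem.Chars.replace s [l] new = s.flatMap (fun c => if c = l then new else [c]) := by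
  rw [PySem.Chars.replace]
  simp only [List.isEmpty_cons, Bool.false_eq_true, if_false]
  simpa using pv_replace_go_single l new s.length s [] le_rfl

-- one guarded replace step is the same flatMap (the guard is semantically idle)
theorem pv_step_eq (s : List Char) (l : Char) (new : List Char) :
    (if PySem.Chars.isIn [l] s then PySem.Chars.replace s [l] new else s)
      = s.flatMap (fun c => if c = l then new else [c]) := by
  by_cases hin : PySem.Chars.isIn [l] s = true
  · rw [if_pos hin, pv_replace_single]
  · have hnotmem : l ∉ s := fun hm =>
      hin ((PySem.Chars.isIn_iff_infix [l] s).mpr ((pv_singleton_infix_iff l s).mpr hm))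
    rw [if_neg hin]
    have : s.flatMap (fun c => if c = l then new else [c]) = s.flatMap (fun c => [c]) :=
      List.flatMap_congr (fun x hx => by
        have : x ≠ l := fun h => hnotmem (h ▸ hx)
        simp [this])
    rw [this, List.flatMap_singleton']

-- the letter loop, for any nodup letter list whose replacements reintroduce no listed letter
theorem pv_foldl_subst (L : List Char) (hnd : L.Nodup)
    (hav : ∀ l ∈ L, ∀ c ∈ pvVarsOf l, c ∉ L) :
    ∀ s : List Char,
      L.foldl (fun result letter =>
          if PySem.Chars.isIn [letter] result then
            PySem.Chars.replace result [letter] (pvVarsOf letter)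
          else result) s
        = s.flatMap (fun c => if c ∈ L then pvVarsOf c else [c]) := by
  induction L with
  | nil => intro s; simp
  | cons l L ih =>
      intro s
      have hnd' : L.Nodup := hnd.of_cons
      have hlL : l ∉ L := (List.nodup_cons.mp hnd).1
      have hav' : ∀ l' ∈ L, ∀ c ∈ pvVarsOf l', c ∉ L := fun l' hl' c hc =>
        fun hcL => hav l' (List.mem_cons_of_mem _ hl') c hc (List.mem_cons_of_mem _ hcL)
      rw [List.foldl_cons, pv_step_eq, ih hnd' hav', List.flatMap_assoc]
      apply List.flatMap_congr
      intro x _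
      by_cases hx : x = l
      · subst hx
        simp only [List.mem_cons, true_or, if_pos]
        have : ∀ c ∈ pvVarsOf x, (if c ∈ L then pvVarsOf c else [c]) = [c] := fun c hc => by
          have : c ∉ L := fun hcL => hav x List.mem_cons_self c hc (List.mem_cons_of_mem _ hcL)
          simp [this]
        rw [List.flatMap_congr this, List.flatMap_singleton']
      · simp only [if_neg hx, List.flatMap_singleton, List.mem_cons]
        have : (x ∈ L → pvVarsOf x = pvVarsOf x) := fun _ => rfl
        by_cases hxL : x ∈ L
        · simp [hxL]
        · simp [hxL, hx]

theorem pv_alphabet_nodup : pvAlphabet.Nodup := by simp [pvAlphabet]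

theorem pv_alphabet_avoid : ∀ l ∈ pvAlphabet, ∀ c ∈ pvVarsOf l, c ∉ pvAlphabet := by
  intro l hl
  fin_cases hl <;>
    simp [pvVarsOf, pvAlphabet, PySem.Int.toChars, Nat.toDigits, Nat.toDigitsCore, Nat.digitChar]

theorem pv_mem_alphabet (c : Char) : c ∈ pvAlphabet ↔ ('A' ≤ c ∧ c ≤ 'Z') := by
  constructor
  · intro h; fin_cases h <;> exact ⟨by decide, by decide⟩
  · rintro ⟨h1, h2⟩
    have h1' : 65 ≤ c.toNat := h1
    have h2' : c.toNat ≤ 90 := h2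
    have halpha : pvAlphabet = (List.range 26).map (fun k => Char.ofNat (65 + k)) := by
      simp [pvAlphabet, List.range_succ]
    rw [halpha]
    refine List.mem_map.mpr ⟨c.toNat - 65, List.mem_range.mpr (by omega), ?_⟩
    have : 65 + (c.toNat - 65) = c.toNat := by omega
    rw [this]
    exact Char.ofNat_toNat c

theorem pv_stage1_eq (s : List Char) :
    pvAlphabet.foldl (fun result letter =>
        if PySem.Chars.isIn [letter] result then
          PySem.Chars.replace result [letter] (pvVarsOf letter)
        else result) s
      = s.flatMap pvSubstChar := by
  rw [pv_foldl_subst pvAlphabet pv_alphabet_nodup pv_alphabet_avoid s]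
  apply List.flatMap_congr
  intro x _
  rw [pvSubstChar]
  by_cases hx : x ∈ pvAlphabet
  · rw [if_pos hx, if_pos ((pv_mem_alphabet x).mp hx)]
  · rw [if_neg hx, if_neg (fun h => hx ((pv_mem_alphabet x).mpr h))]

-- ===== VERDICT (by name: the statement is the Claim_ definition above) =====
theorem translate_expression_py_spec : Claim_equal_translate_expression_py := by
  intro expr _
  unfold Spec_translate_expression_py translate_expression_py translate_expression_py_alt
  rw [pv_stage1_eq]
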